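-- pv_equiv track=rewrite | github.com/CosmonautCode/Hyena-AI | app/cli/commands/code/impl.py | _calc_nesting_depth
-- ===== SOURCE A (Python) =====
-- def _calc_nesting_depth(content: str) -> int:
--     """Calculate maximum nesting depth."""
--     max_depth = 0
--     current_depth = 0
--     for char in content:
--         if char in "{([":
--             current_depth += 1
--             max_depth = max(max_depth, current_depth)
--         elif char in "})]":
--             current_depth -= 1
--     return max_depth
-- ===== SOURCE B (Python) =====
-- def _calc_nesting_depth(content: str) -> int:
--     """Calculate maximum nesting depth (divide and conquer).
--
--     go(s) returns (total, best) where total is the sum of bracket deltas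
--     over s and best is the maximum prefix-sum of s (including the empty
--     prefix, hence >= 0).  For s = s1 + s2 these combine associatively:
--     total = t1 + t2, best = max(b1, t1 + b2), so we split at the midpoint
--     and recurse.
--     """
--     def go(s):
--         if len(s) >= 2:
--             m = len(s) // 2
--             t1, b1 = go(s[:m])
--             t2, b2 = go(s[m:])
--             return (t1 + t2, max(b1, t1 + b2))
--         if s == "":
--             return (0, 0)
--         d = 1 if s in "{([" else -1 if s in "})]" else 0
--         return (d, max(0, d))
--     return go(content)[1]
-- ===== Notes on version B (the rewrite author's own statement) =====
-- stated objective: alternative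
-- what changed: Replaces A's single forward scan with a running (max, current) accumulator by a divide-and-conquer recursion: each half yields a (delta-sum, max-prefix-sum) pair, combined with total = t1+t2 and best = max(b1, t1+b2).
import Mathlib
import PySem

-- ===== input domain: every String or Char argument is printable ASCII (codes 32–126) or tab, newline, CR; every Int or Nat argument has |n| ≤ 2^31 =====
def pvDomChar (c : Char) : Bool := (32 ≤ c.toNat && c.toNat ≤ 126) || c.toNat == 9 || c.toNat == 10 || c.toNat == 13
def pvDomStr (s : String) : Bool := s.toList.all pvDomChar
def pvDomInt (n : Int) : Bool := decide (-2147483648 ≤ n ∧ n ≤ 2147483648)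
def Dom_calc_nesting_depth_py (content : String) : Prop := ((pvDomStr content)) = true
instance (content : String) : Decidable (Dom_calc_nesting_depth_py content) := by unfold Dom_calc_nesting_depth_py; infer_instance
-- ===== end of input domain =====

-- B replaces A's forward scan with a midpoint divide-and-conquer combining (delta-sum, max-prefix) pairs (alternative).

-- ===== PORT A =====
-- one loop step: `if char in "{([": current += 1; max = max(max, current)  elif char in "})]": current -= 1`
def pvStepA (p : Int × Int) (ch : Char) : Int × Int :=
  if ("{([" : String).toList.contains ch then (max p.1 (p.2 + 1), p.2 + 1)
  else if ("})]" : String).toList.contains ch then (p.1, p.2 - 1)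
  else p

def calc_nesting_depth_py (content : String) : Int :=
  (content.toList.foldl pvStepA (0, 0)).1

-- ===== PORT B =====
-- delta of a single character (`1 if s in "{([" else -1 if s in "})]" else 0`)
def pvDelta (ch : Char) : Int :=
  if ("{([" : String).toList.contains ch then 1
  else if ("})]" : String).toList.contains ch then -1 else 0

-- `go(s)`: (delta-sum, max prefix-sum) of s; splits at the midpoint when len(s) >= 2
def pvGo (l : List Char) : Int × Int :=
  if h : 2 ≤ l.length then
    let m := l.length / 2
    let p := pvGo (l.take m)
    let q := pvGo (l.drop m)
    (p.1 + q.1, max p.2 (p.1 + q.2))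
  else
    match l with
    | [] => (0, 0)
    | c :: _ => (pvDelta c, max 0 (pvDelta c))
termination_by l.length
decreasing_by
  · simp only [List.length_take]; omega
  · simp only [List.length_drop]; omega

def calc_nesting_depth_py_alt (content : String) : Int :=
  (pvGo content.toList).2

-- ===== PRECONDITION & SPEC =====
def Spec_calc_nesting_depth_py (content : String) (out : Int) : Prop := out = calc_nesting_depth_py_alt content
instance (content : String) (out : Int) : Decidable (Spec_calc_nesting_depth_py content out) := by unfold Spec_calc_nesting_depth_py; infer_instance

-- ===== CLAIM (what is proved, stated in full; the proofs are below) =====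
def Claim_equal_calc_nesting_depth_py : Prop := ∀ (content : String), Dom_calc_nesting_depth_py content → Spec_calc_nesting_depth_py content (calc_nesting_depth_py content)

-- ===== LEMMAS AND PROOFS =====
-- Reference semantics: delta sum and max prefix-sum (including the empty prefix) of a char list.
def pvSum (l : List Char) : Int := (l.map pvDelta).sum

def pvM : List Char → Int
  | [] => 0
  | c :: tl => max 0 (pvDelta c + pvM tl)

theorem pvM_nonneg (l : List Char) : 0 ≤ pvM l := by
  cases l with
  | nil => simp [pvM]
  | cons c tl => simp [pvM]

theorem pvSum_append (l1 l2 : List Char) : pvSum (l1 ++ l2) = pvSum l1 + pvSum l2 := by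
  simp [pvSum]

theorem pvM_append (l1 l2 : List Char) :
    pvM (l1 ++ l2) = max (pvM l1) (pvSum l1 + pvM l2) := by
  induction l1 with
  | nil => have := pvM_nonneg l2; simp [pvM, pvSum]; omega
  | cons c tl ih =>
    simp only [List.cons_append, pvM, ih, pvSum, List.map_cons, List.sum_cons]
    omega

-- B's divide-and-conquer computes exactly (pvSum, pvM).
theorem pvGo_eq (l : List Char) : pvGo l = (pvSum l, pvM l) := by
  induction l using pvGo.induct with
  | case1 l h m ih1 ih2 =>
    rw [pvGo]
    simp only [dif_pos h]
    rw [ih1, ih2]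
    simp only [Prod.mk.injEq]
    exact ⟨by rw [← pvSum_append, List.take_append_drop],
           by rw [← pvM_append, List.take_append_drop]⟩
  | case2 => simp [pvGo, pvSum, pvM]
  | case3 c tl h =>
    rw [pvGo]
    simp only [dif_neg h]
    have : tl = [] := by cases tl with | nil => rfl | cons d t => simp at h
    subst this
    simp [pvSum, pvM]

-- A's loop invariant: with current ≤ maxd, the fold equals max maxd (current + pvM rest).
theorem pv_foldA (l : List Char) : ∀ (m c : Int), c ≤ m →
    (l.foldl pvStepA (m, c)).1 = max m (c + pvM l) := by
  induction l with
  | nil => intro m c h; simp [pvM]; omega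
  | cons ch tl ih =>
    intro m c h
    have hnn := pvM_nonneg tl
    by_cases h1 : ch = '{' ∨ ch = '(' ∨ ch = '['
    · simp only [List.foldl_cons, pvStepA, pvM, pvDelta]
      simp [h1]
      rw [ih (max m (c+1)) (c+1) (le_max_right _ _)]
      omega
    · by_cases h2 : ch = '}' ∨ ch = ')' ∨ ch = ']'
      · simp only [List.foldl_cons, pvStepA, pvM, pvDelta]
        simp [h1, h2]
        rw [ih m (c-1) (by omega)]
        omega
      · simp only [List.foldl_cons, pvStepA, pvM, pvDelta]
        simp [h1, h2]
        rw [ih m c h]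
        omega

-- ===== VERDICT (by name: the statement is the Claim_ definition above) =====
theorem calc_nesting_depth_py_spec : Claim_equal_calc_nesting_depth_py := by
  intro content _
  unfold Spec_calc_nesting_depth_py calc_nesting_depth_py calc_nesting_depth_py_alt
  rw [pvGo_eq, pv_foldA content.toList 0 0 le_rfl]
  have := pvM_nonneg content.toList
  simp; omega
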